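-- pv_equiv track=rewrite | github.com/youssef-e/Pytesseract-Opencv | src/ocr.py | mrz1_extract
-- ===== SOURCE A (Python) =====
-- def mrz1_extract(extracted_lines):
--     mrz="-1"
--     for line in extracted_lines:
--         line = line.upper()
--         if("<<" in line and ("IDFRA" in line or "IOFRA" in line or "DFRA" in line or "OFRA" in line)):
--             mrz=line
--             break
--     result=""
--     word=mrz
--     if ("-1" not in mrz):
--         #clean the unnecessary caracters from the extracted str
--         for c in mrz:
--             if ((c<'a'or c>'z') and (c<'A'or c>'Z') and (c != '<') and (c <'0' or c >'9')):
--                 word=word.replace(c,"")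
--         result = result + word
--     else:
--         result = "-1"
--     return result
-- ===== SOURCE B (Python) =====
-- def mrz1_extract(extracted_lines):
--     for line in extracted_lines:
--         line = line.upper()
--         # "IDFRA" contains "DFRA" and "IOFRA" contains "OFRA", so two markers suffice
--         if "<<" in line and ("DFRA" in line or "OFRA" in line):
--             return "".join(c for c in line
--                            if ('A' <= c <= 'Z') or ('a' <= c <= 'z')
--                            or ('0' <= c <= '9') or c == '<')
--     return "-1"
-- ===== Notes on version B (the rewrite author's own statement) =====
-- stated objective: simpler
-- what changed: The cleaning phase becomes one filtering pass over the matched line returned directly from the search loop (instead of A's loop rebuilding the whole string via str.replace for every invalid character), and the four substring markers collapse to the two that subsume them.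
-- intended difference: On inputs whose first MRZ-matching line contains the substring '-1' after uppercasing, A returns the failure sentinel '-1' because the matched line collides with its sentinel check, while B returns the cleaned line, which is the intended result for a successfully found MRZ line. — e.g. on mrz1_extract(["IDFRA<<-1"]): A returns "-1", B returns "IDFRA<<1"
import Mathlib
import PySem

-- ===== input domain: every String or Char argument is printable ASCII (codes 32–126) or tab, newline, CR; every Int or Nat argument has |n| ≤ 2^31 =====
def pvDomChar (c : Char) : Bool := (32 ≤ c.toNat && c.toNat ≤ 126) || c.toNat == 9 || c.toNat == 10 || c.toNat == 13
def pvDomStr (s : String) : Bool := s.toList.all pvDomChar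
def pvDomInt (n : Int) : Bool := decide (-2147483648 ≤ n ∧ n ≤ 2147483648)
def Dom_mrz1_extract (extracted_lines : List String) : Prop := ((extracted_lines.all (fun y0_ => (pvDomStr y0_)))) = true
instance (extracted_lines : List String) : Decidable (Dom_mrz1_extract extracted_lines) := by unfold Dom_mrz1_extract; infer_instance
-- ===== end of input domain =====

-- B: one filtering pass over the matched line, returned directly from the search loop,
-- instead of A's loop calling str.replace per invalid character (simpler).

-- ===== PORT A =====
-- A's per-character "unnecessary character" test, transcribed literally
def pvInvalidA (c : Char) : Bool :=
  (decide (c < 'a') || decide ('z' < c)) && (decide (c < 'A') || decide ('Z' < c))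
    && !(c == '<') && (decide (c < '0') || decide ('9' < c))

-- A's first loop: mrz = "-1"; for line in …: line = line.upper(); if …: mrz = line; break
def pvFindA : List String → String
  | [] => "-1"
  | l :: rest =>
    let line := PySem.Str.upper l
    if PySem.Str.isIn "<<" line &&
        (PySem.Str.isIn "IDFRA" line || PySem.Str.isIn "IOFRA" line ||
          PySem.Str.isIn "DFRA" line || PySem.Str.isIn "OFRA" line)
    then line else pvFindA rest

-- A's second loop: word = mrz; for c in mrz: if invalid: word = word.replace(c, "")
def pvCleanA (mrz : String) : String :=
  mrz.toList.foldl
    (fun word c =>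
      if pvInvalidA c then PySem.Str.replace word (String.ofList [c]) "" else word)
    mrz

def mrz1_extract (extracted_lines : List String) : String :=
  let mrz := pvFindA extracted_lines
  if !(PySem.Str.isIn "-1" mrz) then pvCleanA mrz   -- result = "" + word
  else "-1"

-- ===== PORT B =====
-- B's per-character keep test
def pvValidB (c : Char) : Bool :=
  (decide ('A' ≤ c) && decide (c ≤ 'Z')) || (decide ('a' ≤ c) && decide (c ≤ 'z'))
    || (decide ('0' ≤ c) && decide (c ≤ '9')) || (c == '<')

def mrz1_extract_alt : List String → String
  | [] => "-1"
  | l :: rest =>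
    let line := PySem.Str.upper l
    if PySem.Str.isIn "<<" line && (PySem.Str.isIn "DFRA" line || PySem.Str.isIn "OFRA" line)
    then String.ofList (line.toList.filter pvValidB)   -- "".join(c for c in line if valid)
    else mrz1_extract_alt rest

-- ===== PRECONDITION & SPEC =====
-- On inputs whose first MRZ-matching line contains "-1" after uppercasing, A's sentinel
-- check collides with the matched line and A returns "-1"; B returns the cleaned line,
-- the intended result for a successfully found MRZ line.
def D_mrz1_extract (extracted_lines : List String) : Prop :=
  ∃ u ∈ (extracted_lines.map fun l => PySem.Chars.upper l.toList).find? fun u =>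
      decide ("<<".toList <:+: u ∧ ("DFRA".toList <:+: u ∨ "OFRA".toList <:+: u)),
    "-1".toList <:+: u
instance (extracted_lines : List String) : Decidable (D_mrz1_extract extracted_lines) := by
  unfold D_mrz1_extract; infer_instance

def Spec_mrz1_extract (extracted_lines : List String) (out : String) : Prop :=
  ¬ D_mrz1_extract extracted_lines → out = mrz1_extract_alt extracted_lines
instance (extracted_lines : List String) (out : String) : Decidable (Spec_mrz1_extract extracted_lines out) := by unfold Spec_mrz1_extract; infer_instance

def pvDiffWitness_mrz1_extract : List String := ["IDFRA<<-1"]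
def pvDiffWitnessOut_mrz1_extract : String × String := ("-1", "IDFRA<<1")

-- ===== CLAIM (what is proved, stated in full; the proofs are below) =====
def Claim_unchanged_mrz1_extract : Prop := ∀ (extracted_lines : List String), Dom_mrz1_extract extracted_lines → Spec_mrz1_extract extracted_lines (mrz1_extract extracted_lines)
def Claim_changed_mrz1_extract : Prop := Dom_mrz1_extract (pvDiffWitness_mrz1_extract) ∧ D_mrz1_extract (pvDiffWitness_mrz1_extract) ∧ mrz1_extract (pvDiffWitness_mrz1_extract) = pvDiffWitnessOut_mrz1_extract.1 ∧ mrz1_extract_alt (pvDiffWitness_mrz1_extract) = pvDiffWitnessOut_mrz1_extract.2 ∧ pvDiffWitnessOut_mrz1_extract.1 ≠ pvDiffWitnessOut_mrz1_extract.2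
def Claim_exact_mrz1_extract : Prop := ∀ (extracted_lines : List String), Dom_mrz1_extract extracted_lines → D_mrz1_extract extracted_lines → mrz1_extract extracted_lines ≠ mrz1_extract_alt extracted_lines

-- ===== LEMMAS AND PROOFS =====
theorem pv_char_toNat_inj (c d : Char) (h : c.toNat = d.toNat) : c = d :=
  Char.ext (UInt32.toNat_inj.mp h)

theorem pv_beq_lt_char (c : Char) : (c == '<') = decide (c.toNat = 60) := by
  by_cases h : c = '<'
  · subst h; decide
  · have h1 : (c == '<') = false := by simpa using h
    have h2 : decide (c.toNat = 60) = false := by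
      rw [decide_eq_false_iff_not]; intro hn
      exact h (pv_char_toNat_inj c '<' (by simpa using hn))
    rw [h1, h2]

-- A's "unnecessary" test is the negation of B's keep test
theorem pv_inv_eq (c : Char) : pvInvalidA c = !pvValidB c := by
  have hne : ∀ (a b : Char), (a < b) = (a.toNat < b.toNat) := fun _ _ => rfl
  have hle : ∀ (a b : Char), (a ≤ b) = (a.toNat ≤ b.toNat) := fun _ _ => rfl
  rw [Bool.eq_iff_iff]
  simp only [pvInvalidA, pvValidB, hne, hle, pv_beq_lt_char, Bool.and_eq_true, Bool.or_eq_true,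
    Bool.not_eq_true', Bool.or_eq_false_iff, Bool.and_eq_false_iff,
    decide_eq_true_iff, decide_eq_false_iff_not]
  omega

-- replacing a single character by "" is filtering it out
theorem pv_replace_go_filter (fuel : Nat) :
    ∀ (l acc : List Char) (c : Char), l.length ≤ fuel →
      PySem.Chars.replace.go [c] [] fuel l acc = acc.reverse ++ l.filter (· ≠ c) := by
  induction fuel with
  | zero =>
    intro l acc c h
    have : l = [] := List.length_eq_zero_iff.mp (Nat.le_zero.mp h)
    subst this
    simp [PySem.Chars.replace.go]
  | succ n ih =>
    intro l acc c h
    cases l with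
    | nil => simp [PySem.Chars.replace.go]
    | cons d t =>
      simp only [PySem.Chars.replace.go]
      by_cases hcc : c = d
      · subst hcc
        have hp : List.isPrefixOf [c] (c :: t) = true := by
          simp [List.isPrefixOf]
        rw [if_pos hp]
        simp only [List.length_cons] at h
        rw [ih _ _ c (by simpa using Nat.le_of_succ_le_succ h)]
        simp
      · have hp : List.isPrefixOf [c] (d :: t) = false := by
          simp [List.isPrefixOf]; exact fun hh => absurd hh hcc
        rw [if_neg (by simp [hp])]
        simp only [List.length_cons] at h
        rw [ih t (d :: acc) c (Nat.le_of_succ_le_succ h)]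
        simp [Ne.symm hcc]

theorem pv_replace_single (s : List Char) (c : Char) :
    PySem.Chars.replace s [c] [] = s.filter (· ≠ c) := by
  simp only [PySem.Chars.replace, List.isEmpty_cons]
  simpa using pv_replace_go_filter s.length s [] c le_rfl

-- A's replace loop computes the filter of the valid characters
theorem pv_clean_loop (cs : List Char) : ∀ (w : String),
    (∀ c ∈ w.toList, pvInvalidA c = true → c ∈ cs) →
      cs.foldl (fun word c =>
          if pvInvalidA c then PySem.Str.replace word (String.ofList [c]) "" else word) w
        = String.ofList (w.toList.filter (fun c => !pvInvalidA c)) := by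
  induction cs with
  | nil =>
    intro w hw
    have : w.toList.filter (fun c => !pvInvalidA c) = w.toList := by
      apply List.filter_eq_self.mpr
      intro c hc
      simp only [Bool.not_eq_eq_eq_not, Bool.not_true]
      by_contra h
      exact absurd (hw c hc (by simpa using h)) (List.not_mem_nil)
    rw [List.foldl_nil, this, String.ofList_toList]
  | cons c cs ih =>
    intro w hw
    rw [List.foldl_cons]
    by_cases hc : pvInvalidA c = true
    · rw [if_pos hc]
      have htl : (PySem.Str.replace w (String.ofList [c]) "").toList
          = w.toList.filter (· ≠ c) := by
        rw [PySem.Str.toList_replace, String.toList_ofList]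
        exact pv_replace_single w.toList c
      rw [ih _ ?_]
      · rw [htl, List.filter_filter]
        congr 1
        apply List.filter_congr
        intro a _
        by_cases ha : pvInvalidA a = true
        · simp [ha]
        · have hac : a ≠ c := fun h => by rw [h] at ha; exact ha hc
          simp [ha, hac]
      · intro d hd hinv
        rw [htl] at hd
        have := List.mem_filter.mp hd
        have hdc : d ≠ c := by simpa using this.2
        rcases List.mem_cons.mp (hw d this.1 hinv) with h | h
        · exact absurd h hdc
        · exact h
    · rw [if_neg hc]
      apply ih
      intro d hd hinv
      rcases List.mem_cons.mp (hw d hd hinv) with h | h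
      · exact absurd (h ▸ hinv) hc
      · exact h

-- A's four markers are equivalent to B's two
theorem pv_cond_eq (line : String) :
    (PySem.Str.isIn "<<" line &&
      (PySem.Str.isIn "IDFRA" line || PySem.Str.isIn "IOFRA" line ||
        PySem.Str.isIn "DFRA" line || PySem.Str.isIn "OFRA" line))
    = (PySem.Str.isIn "<<" line && (PySem.Str.isIn "DFRA" line || PySem.Str.isIn "OFRA" line)) := by
  rw [Bool.eq_iff_iff]
  simp only [Bool.and_eq_true, Bool.or_eq_true, PySem.Str.isIn_iff_infix]
  constructor
  · rintro ⟨h1, h2⟩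
    refine ⟨h1, ?_⟩
    rcases h2 with ((h | h) | h) | h
    · exact Or.inl (List.IsInfix.trans (by decide) h)
    · exact Or.inr (List.IsInfix.trans (by decide) h)
    · exact Or.inl h
    · exact Or.inr h
  · rintro ⟨h1, h2⟩
    exact ⟨h1, by tauto⟩

-- D_'s line test agrees with the ports' matching condition
theorem pv_isMrz_eq (l : String) :
    (decide ("<<".toList <:+: PySem.Chars.upper l.toList ∧
        ("DFRA".toList <:+: PySem.Chars.upper l.toList ∨
          "OFRA".toList <:+: PySem.Chars.upper l.toList)))
      = (PySem.Str.isIn "<<" (PySem.Str.upper l) &&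
        (PySem.Str.isIn "DFRA" (PySem.Str.upper l) || PySem.Str.isIn "OFRA" (PySem.Str.upper l))) := by
  rw [Bool.eq_iff_iff]
  simp [PySem.Str.isIn, PySem.Chars.isIn_iff_infix, PySem.Str.toList_upper]

-- D_ on a cons, split on whether the head line matches
theorem pv_D_cons (l : String) (rest : List String) :
    D_mrz1_extract (l :: rest) ↔
      (if (PySem.Str.isIn "<<" (PySem.Str.upper l) &&
            (PySem.Str.isIn "DFRA" (PySem.Str.upper l) || PySem.Str.isIn "OFRA" (PySem.Str.upper l))) = true
       then decide ("-1".toList <:+: PySem.Chars.upper l.toList) = true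
       else D_mrz1_extract rest) := by
  unfold D_mrz1_extract
  rw [List.map_cons, List.find?_cons]
  split
  · rename_i h
    rw [pv_isMrz_eq] at h
    rw [if_pos h]
    simp
  · rename_i h
    rw [pv_isMrz_eq] at h
    rw [if_neg (Bool.eq_false_iff.mp h)]

-- B's filter output never contains '-', so it can never be "-1"
theorem pv_filter_ne_dash (l : List Char) : String.ofList (l.filter pvValidB) ≠ "-1" := by
  intro h
  have := congrArg String.toList h
  rw [String.toList_ofList] at this
  have hmem : '-' ∈ l.filter pvValidB := by rw [this]; decide
  have := (List.mem_filter.mp hmem).2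
  exact absurd this (by decide)

-- ===== VERDICT (by name: the statement is the Claim_ definition above) =====
theorem mrz1_extract_spec : Claim_unchanged_mrz1_extract := by
  intro lines hdom
  unfold Spec_mrz1_extract
  induction lines with
  | nil => intro _; rfl
  | cons l rest ih =>
    intro hd
    have hdr : Dom_mrz1_extract rest := by
      unfold Dom_mrz1_extract at hdom ⊢
      simp only [List.all_cons, Bool.and_eq_true] at hdom
      exact hdom.2
    rw [mrz1_extract_alt]
    simp only [mrz1_extract, pvFindA, pv_cond_eq]
    by_cases hc : (PySem.Str.isIn "<<" (PySem.Str.upper l) &&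
        (PySem.Str.isIn "DFRA" (PySem.Str.upper l) || PySem.Str.isIn "OFRA" (PySem.Str.upper l))) = true
    · rw [if_pos hc, if_pos hc]
      rw [pv_D_cons, if_pos hc] at hd
      have h1 : PySem.Str.isIn "-1" (PySem.Str.upper l) = false := by
        rw [Bool.eq_false_iff]
        rw [Ne, PySem.Str.isIn_iff_infix]
        simpa [PySem.Str.toList_upper] using hd
      rw [h1, if_pos (by decide)]
      rw [pvCleanA, pv_clean_loop _ _ (fun c hc _ => hc)]
      congr 1
      apply List.filter_congr
      intro a _
      rw [pv_inv_eq, Bool.not_not]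
    · rw [if_neg hc, if_neg hc]
      rw [pv_D_cons, if_neg hc] at hd
      simpa [mrz1_extract] using ih hdr hd

theorem mrz1_extract_changed : Claim_changed_mrz1_extract := by
  unfold Claim_changed_mrz1_extract; decide

theorem mrz1_extract_tight : Claim_exact_mrz1_extract := by
  intro lines hdom hd
  induction lines with
  | nil => exact absurd hd (by decide)
  | cons l rest ih =>
    have hdr : Dom_mrz1_extract rest := by
      unfold Dom_mrz1_extract at hdom ⊢
      simp only [List.all_cons, Bool.and_eq_true] at hdom
      exact hdom.2
    rw [mrz1_extract_alt]
    simp only [mrz1_extract, pvFindA, pv_cond_eq]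
    by_cases hc : (PySem.Str.isIn "<<" (PySem.Str.upper l) &&
        (PySem.Str.isIn "DFRA" (PySem.Str.upper l) || PySem.Str.isIn "OFRA" (PySem.Str.upper l))) = true
    · rw [if_pos hc, if_pos hc]
      rw [pv_D_cons, if_pos hc] at hd
      have h1 : PySem.Str.isIn "-1" (PySem.Str.upper l) = true := by
        rw [PySem.Str.isIn_iff_infix]
        simpa [PySem.Str.toList_upper] using hd
      rw [h1, if_neg (by decide)]
      exact fun h => pv_filter_ne_dash _ h.symm
    · rw [if_neg hc, if_neg hc]
      rw [pv_D_cons, if_neg hc] at hd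
      simpa [mrz1_extract] using ih hdr hd
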